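-- pv_equiv track=rewrite | github.com/mcostaEECS/msar-cda-simulator | analysis/MainROC.py | OrderData
-- ===== SOURCE A (Python) =====
-- def OrderData(theta, tput_meas):
--     Theta = sorted(set(theta))
--     TPUT_meas = []
--     for k in range(len(Theta)):
--         indexes=[i for i, x in enumerate(theta) if x == Theta[k]]
--         Tput_meas= 0
--         for i in indexes:
--             Tput_meas += tput_meas[i]
--         TPUT_meas.append(Tput_meas)
--     return Theta, TPUT_meas
-- ===== SOURCE B (Python) =====
-- from itertools import groupby
--
--
-- def OrderData(theta, tput_meas):
--     pairs = sorted(zip(theta, tput_meas), key=lambda p: p[0])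
--     Theta = []
--     TPUT_meas = []
--     for key, grp in groupby(pairs, key=lambda p: p[0]):
--         Theta.append(key)
--         TPUT_meas.append(sum(t for _, t in grp))
--     return Theta, TPUT_meas
-- ===== Notes on version B (the rewrite author's own statement) =====
-- stated objective: faster
-- what changed: Replaces A's per-distinct-value full scans of theta (one enumerate pass per distinct theta) with a single stable sort of the (theta, tput) pairs followed by one consecutive groupby/summing pass.
import Mathlib
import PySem

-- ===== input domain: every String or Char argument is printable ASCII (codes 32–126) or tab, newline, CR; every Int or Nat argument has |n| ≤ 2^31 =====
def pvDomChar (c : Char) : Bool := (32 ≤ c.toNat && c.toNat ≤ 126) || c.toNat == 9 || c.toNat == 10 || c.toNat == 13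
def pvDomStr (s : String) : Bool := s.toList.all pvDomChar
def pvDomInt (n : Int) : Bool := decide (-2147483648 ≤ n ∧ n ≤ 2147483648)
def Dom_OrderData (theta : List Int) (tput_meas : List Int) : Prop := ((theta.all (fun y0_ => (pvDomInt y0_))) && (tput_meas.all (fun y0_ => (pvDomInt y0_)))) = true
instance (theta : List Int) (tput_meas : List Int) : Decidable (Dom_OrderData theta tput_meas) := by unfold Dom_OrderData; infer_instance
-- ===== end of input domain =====

-- B replaces A's one-full-scan-per-distinct-theta with a single stable sort of the
-- zipped pairs plus one consecutive grouping pass (objective: faster).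

-- ===== PORT A =====
def OrderData (theta : List Int) (tput_meas : List Int) : List Int × List Int :=
  let Theta := PySem.List.sorted (PySem.Set.ofList theta) (fun x => x) false
  let TPUT_meas := (PySem.List.pyRange 0 (Theta.length : Int) 1).foldl (fun acc k =>
    let indexes := ((PySem.List.enumerate theta 0).filter
        (fun p => p.2 == PySem.List.pyGetD Theta k 0)).map Prod.fst
    let Tput := indexes.foldl (fun s i => s + PySem.List.pyGetD tput_meas i 0) 0
    acc ++ [Tput]) []
  (Theta, TPUT_meas)

-- ===== PORT B =====
-- itertools.groupby on the key p.1: group consecutive runs of equal keys, keeping each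
-- group's second components in order.
def pvGroups : List (Int × Int) → List (Int × List Int)
  | [] => []
  | (k, v) :: rest =>
    match pvGroups rest with
    | (k', vs) :: gs => if k = k' then (k, v :: vs) :: gs else (k, [v]) :: (k', vs) :: gs
    | [] => [(k, [v])]

def OrderData_alt (theta : List Int) (tput_meas : List Int) : List Int × List Int :=
  let pairs := PySem.List.sorted (theta.zip tput_meas) (fun p => p.1) false
  let groups := pvGroups pairs
  (groups.map Prod.fst, groups.map (fun g => g.2.sum))

-- ===== PRECONDITION & SPEC =====
-- Pre_ excludes exactly the inputs where A raises IndexError (tput_meas[i] with i an index of theta).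
def Pre_OrderData (theta : List Int) (tput_meas : List Int) : Prop :=
  theta.length ≤ tput_meas.length
instance (theta : List Int) (tput_meas : List Int) : Decidable (Pre_OrderData theta tput_meas) := by unfold Pre_OrderData; infer_instance
def pvWitness_OrderData : List Int × List Int := ([3, 1, 3, 2, 1], [10, 20, 30, 40, 50])

def Spec_OrderData (theta : List Int) (tput_meas : List Int) (out : List Int × List Int) : Prop := out = OrderData_alt theta tput_meas
instance (theta : List Int) (tput_meas : List Int) (out : List Int × List Int) : Decidable (Spec_OrderData theta tput_meas out) := by unfold Spec_OrderData; infer_instance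

-- ===== CLAIM (what is proved, stated in full; the proofs are below) =====
def Claim_equal_OrderData : Prop := ∀ (theta : List Int) (tput_meas : List Int), Dom_OrderData theta tput_meas → Pre_OrderData theta tput_meas → Spec_OrderData theta tput_meas (OrderData theta tput_meas)

-- ===== LEMMAS AND PROOFS =====

-- A's inner loop for value v, generalized over the enumerate start: the sum of
-- tput_meas at the indices where theta is v equals the sum of the second components
-- of the zipped pairs whose first component is v.
theorem pvGen (v : Int) (full : List Int) :
    ∀ (theta : List Int) (s : Nat), s + theta.length ≤ full.length →
    (((PySem.List.enumerate theta (s : Int)).filter (fun p => p.2 == v)).map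
        (fun p => PySem.List.pyGetD full p.1 0)).sum
      = (((theta.zip (full.drop s)).filter (fun p => p.1 == v)).map Prod.snd).sum := by
  intro theta
  induction theta with
  | nil => intro s h; simp [PySem.List.enumerate_nil]
  | cons a l ih =>
    intro s h
    have hs : s < full.length := by simp at h; omega
    have hdrop : full.drop s = full[s] :: full.drop (s + 1) :=
      List.drop_eq_getElem_cons hs
    have hcast : (s : Int) + 1 = ((s + 1 : Nat) : Int) := by push_cast; ring
    have ihs := ih (s + 1) (by simp at h ⊢; omega)
    rw [PySem.List.enumerate_cons, hdrop, hcast]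
    by_cases hv : a = v
    · simp only [List.zip_cons_cons, List.filter_cons, hv, beq_self_eq_true, if_pos,
        List.map_cons, List.sum_cons, ihs, PySem.List.pyGetD_natCast, List.getD_eq_getElem _ _ hs]
    · have : (a == v) = false := by simp [hv]
      simp only [List.zip_cons_cons, List.filter_cons, this, Bool.false_eq_true]
      simpa using ihs

theorem pvGroups_cons (k v : Int) (rest : List (Int × Int)) :
    pvGroups ((k, v) :: rest) = match pvGroups rest with
      | (k', vs) :: gs => if k = k' then (k, v :: vs) :: gs else (k, [v]) :: (k', vs) :: gs
      | [] => [(k, [v])] := rfl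

theorem pvGroups_spec (S : List (Int × Int)) (h : S.Pairwise (fun a b => a.1 ≤ b.1)) :
    ((pvGroups S).map Prod.fst).Pairwise (· < ·)
    ∧ (∀ x, x ∈ (pvGroups S).map Prod.fst ↔ x ∈ S.map Prod.fst)
    ∧ (∀ p ps, S = p :: ps → ∃ vs gs, pvGroups S = (p.1, vs) :: gs)
    ∧ (∀ g ∈ pvGroups S, g.2 = (S.filter (fun p => p.1 == g.1)).map Prod.snd) := by
  induction S with
  | nil => simp [pvGroups]
  | cons p rest ih =>
    obtain ⟨k, v⟩ := p
    rw [List.pairwise_cons] at h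
    obtain ⟨hhead, hrest⟩ := h
    obtain ⟨ih1, ih2, ih3, ih4⟩ := ih hrest
    cases rest with
    | nil => simp [pvGroups]
    | cons r rs =>
      obtain ⟨vs, gs, hg⟩ := ih3 r rs rfl
      rw [hg] at ih1 ih2
      have hkr : k ≤ r.1 := hhead r (by simp)
      -- key of every produced group of rest is ≥ r.1
      have hge : ∀ g' ∈ (r.1, vs) :: gs, r.1 ≤ g'.1 := by
        intro g' hg'
        rcases List.mem_cons.mp hg' with h' | h'
        · rw [h']
        · exact le_of_lt ((List.pairwise_cons.mp ih1).1 g'.1 (List.mem_map_of_mem h'))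
      by_cases hk : k = r.1
      · have hres : pvGroups ((k, v) :: r :: rs) = (k, v :: vs) :: gs := by
          rw [pvGroups_cons, hg]
          simp [hk]
        refine ⟨?_, ?_, ?_, ?_⟩
        · rw [hres]; simpa [hk] using ih1
        · intro x
          rw [hres]
          have := ih2 x
          simp only [hk, List.map_cons, List.mem_cons] at this ⊢
          tauto
        · intro p ps hps
          injection hps with h1 h2
          subst h1
          exact ⟨v :: vs, gs, hres⟩
        · intro g hgmem
          rw [hres] at hgmem
          rcases List.mem_cons.mp hgmem with h' | h'
          · subst h'
            have hv : vs = ((r :: rs).filter (fun p => p.1 == r.1)).map Prod.snd :=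
              ih4 (r.1, vs) (by rw [hg]; simp)
            rw [List.filter_cons_of_pos (by simp), List.map_cons, hk, ← hv]
          · have hne : (k == g.1) = false := by
              have := (List.pairwise_cons.mp ih1).1 g.1 (List.mem_map_of_mem h')
              simp only [beq_eq_false_iff_ne, ne_eq]
              omega
            have := ih4 g (by rw [hg]; exact List.mem_cons_of_mem _ h')
            rw [List.filter_cons_of_neg (by simpa using hne)]
            exact this
      · have hklt : k < r.1 := lt_of_le_of_ne hkr hk
        have hres : pvGroups ((k, v) :: r :: rs) = (k, [v]) :: (r.1, vs) :: gs := by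
          rw [pvGroups_cons, hg]
          simp [hk]
        refine ⟨?_, ?_, ?_, ?_⟩
        · rw [hres]
          simp only [List.map_cons, List.pairwise_cons] at ih1 ⊢
          refine ⟨?_, ih1⟩
          intro b hb
          rcases List.mem_cons.mp hb with h' | h'
          · omega
          · have := ih1.1 b h'; omega
        · intro x
          rw [hres]
          have := ih2 x
          simp only [List.map_cons, List.mem_cons] at this ⊢
          tauto
        · intro p ps hps
          injection hps with h1 h2
          subst h1
          exact ⟨[v], (r.1, vs) :: gs, hres⟩
        · intro g hgmem
          rw [hres] at hgmem
          rcases List.mem_cons.mp hgmem with h' | h'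
          · subst h'
            have hnone : (r :: rs).filter (fun p => p.1 == k) = [] := by
              rw [List.filter_eq_nil_iff]
              intro a ha
              simp only [beq_iff_eq]
              rcases List.mem_cons.mp ha with h' | h'
              · subst h'; omega
              · have := (List.pairwise_cons.mp hrest).1 a h'
                omega
            rw [List.filter_cons_of_pos (by simp), hnone, List.map_cons]
            simp
          · have hne : (k == g.1) = false := by
              have := hge g h'
              simp only [beq_eq_false_iff_ne, ne_eq]
              omega
            have := ih4 g (by rw [hg]; exact h')
            rw [List.filter_cons_of_neg (by simpa using hne)]
            exact this


theorem pvA_eq (theta tput : List Int) (h : theta.length ≤ tput.length) :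
    OrderData theta tput
      = (PySem.List.sorted (PySem.Set.ofList theta) (fun x => x) false,
         (PySem.List.sorted (PySem.Set.ofList theta) (fun x => x) false).map
           (fun v => (((theta.zip tput).filter (fun p => p.1 == v)).map Prod.snd).sum)) := by
  unfold OrderData
  simp only
  rw [PySem.List.foldl_append_singleton_eq_map, List.nil_append]
  refine Prod.ext rfl ?_
  simp only
  rw [show (fun k => (((PySem.List.enumerate theta 0).filter
        (fun p => p.2 == PySem.List.pyGetD (PySem.List.sorted (PySem.Set.ofList theta)
          (fun x => x) false) k 0)).map Prod.fst).foldl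
        (fun s i => s + PySem.List.pyGetD tput i 0) 0)
      = (fun v => (((PySem.List.enumerate theta 0).filter (fun p => p.2 == v)).map
          Prod.fst).foldl (fun s i => s + PySem.List.pyGetD tput i 0) 0)
        ∘ (fun k => PySem.List.pyGetD (PySem.List.sorted (PySem.Set.ofList theta)
          (fun x => x) false) k 0) from rfl,
     ← List.map_map, PySem.List.map_pyGetD_pyRange_zero']
  refine List.map_congr_left ?_
  intro v _
  rw [PySem.List.foldl_add, zero_add, List.map_map]
  have hgen := pvGen v tput theta 0 (by simpa using h)
  simpa using hgen

theorem pvB_eq (theta tput : List Int) (h : theta.length ≤ tput.length) :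
    OrderData_alt theta tput
      = (PySem.List.sorted (PySem.Set.ofList theta) (fun x => x) false,
         (PySem.List.sorted (PySem.Set.ofList theta) (fun x => x) false).map
           (fun v => (((theta.zip tput).filter (fun p => p.1 == v)).map Prod.snd).sum)) := by
  unfold OrderData_alt
  have hpw : (PySem.List.sorted (theta.zip tput) (fun p => p.1) false).Pairwise
      (fun a b => a.1 ≤ b.1) := PySem.List.sorted_pairwise _ _
  obtain ⟨h1, h2, -, h4⟩ := pvGroups_spec _ hpw
  have hperm : (PySem.List.sorted (theta.zip tput) (fun p => p.1) false).Perm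
      (theta.zip tput) := PySem.List.sorted_perm _ _ _
  have hfst : (theta.zip tput).map Prod.fst = theta := List.map_fst_zip h
  have hnodup : ((pvGroups (PySem.List.sorted (theta.zip tput) (fun p => p.1) false)).map
      Prod.fst).Nodup := by exact h1.imp fun hlt => ne_of_lt hlt
  have hmemK : ∀ x, x ∈ (pvGroups (PySem.List.sorted (theta.zip tput) (fun p => p.1) false)).map
      Prod.fst ↔ x ∈ PySem.Set.ofList theta := by
    intro x
    rw [h2 x, PySem.Set.mem_ofList]
    have hmi := (hperm.map Prod.fst).mem_iff (a := x)
    rw [hfst] at hmi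
    exact hmi
  have hpermK : ((pvGroups (PySem.List.sorted (theta.zip tput) (fun p => p.1) false)).map
      Prod.fst).Perm (PySem.Set.ofList theta) :=
    (List.perm_ext_iff_of_nodup hnodup (PySem.Set.nodup_ofList _)).mpr hmemK
  have hK : PySem.List.sorted (PySem.Set.ofList theta) (fun x => x) false
      = (pvGroups (PySem.List.sorted (theta.zip tput) (fun p => p.1) false)).map Prod.fst :=
    PySem.List.sorted_eq_of_perm_of_pairwise_lt _ _ _ hpermK h1
  have hsum : ∀ g ∈ pvGroups (PySem.List.sorted (theta.zip tput) (fun p => p.1) false),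
      g.2.sum = (((theta.zip tput).filter (fun p => p.1 == g.1)).map Prod.snd).sum := by
    intro g hgm
    rw [h4 g hgm]
    exact ((hperm.filter _).map Prod.snd).sum_eq
  rw [hK]
  refine Prod.ext rfl ?_
  simp only
  rw [List.map_map]
  exact List.map_congr_left hsum

-- ===== VERDICT (by name: the statement is the Claim_ definition above) =====
theorem OrderData_spec : Claim_equal_OrderData := by
  intro theta tput _ hpre
  unfold Spec_OrderData
  rw [pvA_eq theta tput hpre, pvB_eq theta tput hpre]
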